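-- pv_equiv track=rewrite | github.com/ict-agent/treecode | task/uniopbench_standalone/run_treecode.py | redact_command
-- ===== SOURCE A (Python) =====
-- def redact_command(command: list[str]) -> list[str]:
--     redacted: list[str] = []
--     redact_next = False
--     for item in command:
--         if redact_next:
--             redacted.append("<redacted>")
--             redact_next = False
--             continue
--         redacted.append(item)
--         if item == "--api-key":
--             redact_next = True
--     return redacted
-- ===== SOURCE B (Python) =====
-- def redact_command(command: list[str]) -> list[str]:
--     redact_idx: set[int] = set()
--     i = 0
--     n = len(command)
--     while i < n:
--         if command[i] == "--api-key":
--             redact_idx.add(i + 1)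
--             i += 2
--         else:
--             i += 1
--     return ["<redacted>" if i in redact_idx else item for i, item in enumerate(command)]
-- ===== Notes on version B (the rewrite author's own statement) =====
-- stated objective: alternative
-- what changed: Replaces the single boolean-state loop by two passes: an index-scanning while loop that collects the set of positions to redact (jumping by 2 past a flag so consecutive flags do not chain), then a comprehension over enumerate that substitutes '<redacted>' at collected indices.
import Mathlib
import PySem

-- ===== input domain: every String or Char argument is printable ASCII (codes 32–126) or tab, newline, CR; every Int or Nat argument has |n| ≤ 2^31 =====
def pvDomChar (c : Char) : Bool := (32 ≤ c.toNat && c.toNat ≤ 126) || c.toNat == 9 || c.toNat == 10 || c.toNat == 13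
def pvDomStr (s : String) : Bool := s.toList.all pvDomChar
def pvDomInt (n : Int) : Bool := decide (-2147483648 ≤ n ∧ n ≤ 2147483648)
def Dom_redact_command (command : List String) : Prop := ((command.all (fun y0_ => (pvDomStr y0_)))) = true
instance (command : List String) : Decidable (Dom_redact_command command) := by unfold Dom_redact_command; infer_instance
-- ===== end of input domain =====

-- B rebuilds the result in two passes (collect the set of indices to redact with an
-- index-jumping while loop, then substitute by enumerate) instead of A's single
-- boolean-state loop; objective: alternative decomposition, same O(n) cost.

-- ===== PORT A =====
-- loop body of A's for loop (state: redacted list so far, redact_next flag)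
def pvStepA (st : List String × Bool) (item : String) : List String × Bool :=
  if st.2 then (st.1 ++ ["<redacted>"], false)
  else (st.1 ++ [item], item == "--api-key")

def redact_command (command : List String) : List String :=
  (command.foldl pvStepA ([], false)).1

-- ===== PORT B =====
-- the while loop of Source B: command[i] is always in range here (0 ≤ i < len), so pyGetD is exact
def pvCollectIdx (command : List String) (i : Int) (s : List Int) : List Int :=
  if i < (command.length : Int) then
    if PySem.List.pyGetD command i "" == "--api-key" then
      pvCollectIdx command (i + 2) (PySem.Set.add s (i + 1))
    else
      pvCollectIdx command (i + 1) s
  else s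
termination_by ((command.length : Int) - i).toNat
decreasing_by all_goals omega

def redact_command_alt (command : List String) : List String :=
  let redactIdx := pvCollectIdx command 0 []
  (PySem.List.enumerate command 0).map
    (fun p => if redactIdx.contains p.1 then "<redacted>" else p.2)

-- ===== PRECONDITION & SPEC =====
def Spec_redact_command (command : List String) (out : List String) : Prop := out = redact_command_alt command
instance (command : List String) (out : List String) : Decidable (Spec_redact_command command out) := by unfold Spec_redact_command; infer_instance

-- ===== CLAIM (what is proved, stated in full; the proofs are below) =====
def Claim_equal_redact_command : Prop := ∀ (command : List String), Dom_redact_command command → Spec_redact_command command (redact_command command)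

-- ===== LEMMAS AND PROOFS =====

/-- Reference recursion: the common value of both programs. -/
def pvFA : List String → List String
  | [] => []
  | [x] => [x]
  | x :: y :: rest =>
    if x == "--api-key" then x :: "<redacted>" :: pvFA rest
    else x :: pvFA (y :: rest)

/-- Indices to redact, relative to the start of the list. -/
def pvG : List String → List Int
  | [] => []
  | [x] => if x == "--api-key" then [1] else []
  | x :: y :: rest =>
    if x == "--api-key" then 1 :: (pvG rest).map (· + 2)
    else (pvG (y :: rest)).map (· + 1)

lemma pvG_pos : ∀ (cmd : List String), ∀ a ∈ pvG cmd, 1 ≤ a := by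
  intro cmd
  fun_induction pvG cmd with
  | case1 => simp
  | case2 x hx => simp
  | case3 x hx => simp
  | case4 x y rest hx ih =>
    simp only [List.mem_cons, List.mem_map]
    rintro a (rfl | ⟨b, hb, rfl⟩)
    · omega
    · have := ih b hb; omega
  | case5 x y rest hx ih =>
    simp only [List.mem_map]
    rintro a ⟨b, hb, rfl⟩
    have := ih b hb; omega

lemma pvLoopA : ∀ (cmd acc : List String) (b : Bool),
    (cmd.foldl pvStepA (acc, b)).1
    = acc ++ (if b then (match cmd with | [] => [] | _ :: r => "<redacted>" :: pvFA r) else pvFA cmd) := by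
  intro cmd
  induction cmd with
  | nil => intro acc b; cases b <;> simp [pvFA]
  | cons x rest ih =>
    intro acc b
    cases b with
    | true =>
      rw [List.foldl_cons, show pvStepA (acc, true) x = (acc ++ ["<redacted>"], false) by
        simp [pvStepA], ih]
      simp
    | false =>
      rw [List.foldl_cons, show pvStepA (acc, false) x = (acc ++ [x], x == "--api-key") by
        simp [pvStepA], ih]
      by_cases hx : (x == "--api-key") = true
      · cases rest <;> simp [pvFA, hx]
      · cases rest <;> simp [pvFA, hx]

lemma pvA_eq_FA (cmd : List String) : redact_command cmd = pvFA cmd := by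
  unfold redact_command
  simpa using pvLoopA cmd [] false

lemma pvCollect_eq : ∀ (cmd : List String) (i : Int) (s : List Int),
    0 ≤ i → (∀ a ∈ s, a ≤ i) →
    pvCollectIdx cmd i s = s ++ (pvG (cmd.drop i.toNat)).map (· + i) := by
  intro cmd i s
  fun_induction pvCollectIdx cmd i s with
  | case1 i s hlt hx ih =>
    intro hi hs
    have hin : i.toNat < cmd.length := by omega
    have hns : ¬ PySem.Set.contains s (i + 1) = true := by
      intro hc
      have hm : (i + 1) ∈ s := by simpa [PySem.Set.contains] using hc
      have := hs _ hm; omega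
    have hadd : PySem.Set.add s (i + 1) = s ++ [i + 1] := by
      unfold PySem.Set.add
      rw [if_neg hns]
    rw [hadd] at ih
    have ih' := ih (by omega) (by
      intro a ha
      rcases List.mem_append.mp ha with h | h
      · have := hs a h; omega
      · simp at h; omega)
    rw [hadd, ih']
    have hdropcons : cmd.drop i.toNat = cmd[i.toNat] :: cmd.drop (i.toNat + 1) :=
      List.drop_eq_getElem_cons hin
    have hget : cmd[i.toNat] = "--api-key" := by
      have heq := PySem.List.pyGetD_eq_getElem cmd "" (by omega) (by exact_mod_cast hlt)
      rw [heq] at hx; exact (beq_iff_eq.mp hx)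
    cases hdrop2 : cmd.drop (i.toNat + 1) with
    | nil =>
      have hnil : cmd.drop (i + 2).toNat = [] := by
        have hlen := congrArg List.length hdrop2
        simp only [List.length_drop, List.length_nil] at hlen
        apply List.drop_eq_nil_of_le; omega
      rw [hnil, hdropcons, hdrop2, hget]
      simp only [pvG, List.map_nil, List.append_nil, beq_self_eq_true, if_true,
        List.map_cons, List.map_nil]
      simp
      omega
    | cons y r =>
      have hr : r = cmd.drop (i + 2).toNat := by
        have htl := congrArg List.tail hdrop2
        simp only [List.tail_drop, List.tail_cons] at htl
        rw [show (i + 2).toNat = i.toNat + 1 + 1 by omega, htl]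
      rw [hdropcons, hdrop2, hget]
      simp only [pvG, beq_self_eq_true, if_true, List.map_cons, List.map_map, ← hr]
      rw [List.append_assoc, List.singleton_append]
      congr 1
      congr 1
      · omega
      · apply List.map_congr_left; intro a _; simp [Function.comp]; omega
  | case2 i s hlt hx ih =>
    intro hi hs
    have hin : i.toNat < cmd.length := by omega
    have ih' := ih (by omega) (by intro a ha; have := hs a ha; omega)
    rw [ih']
    have hdropcons : cmd.drop i.toNat = cmd[i.toNat] :: cmd.drop (i.toNat + 1) :=
      List.drop_eq_getElem_cons hin
    have hget : ¬ (cmd[i.toNat] == "--api-key") := by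
      have heq := PySem.List.pyGetD_eq_getElem cmd "" (by omega) (by exact_mod_cast hlt)
      rw [heq] at hx; exact hx
    cases hdrop2 : cmd.drop (i.toNat + 1) with
    | nil =>
      rw [show (i + 1).toNat = i.toNat + 1 by omega, hdrop2]
      rw [hdropcons, hdrop2]
      simp [pvG, hget]
    | cons y r =>
      rw [show (i + 1).toNat = i.toNat + 1 by omega, hdrop2]
      rw [hdropcons, hdrop2]
      simp only [pvG, hget, Bool.false_eq_true, if_false, List.map_map]
      congr 1
      apply List.map_congr_left; intro a _; simp [Function.comp]; omega
  | case3 i s hlt =>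
    intro hi hs
    have hnil : cmd.drop i.toNat = [] := List.drop_eq_nil_iff.mpr (by omega)
    simp [hnil, pvG]

lemma pvMapRed : ∀ (cmd : List String) (s : Int) (extra : List Int),
    (∀ a ∈ extra, a < s) →
    (PySem.List.enumerate cmd s).map
      (fun p => if (extra ++ (pvG cmd).map (· + s)).contains p.1 then "<redacted>" else p.2)
    = pvFA cmd := by
  intro cmd
  fun_induction pvG cmd with
  | case1 => intro s extra _; simp [PySem.List.enumerate_nil, pvFA]
  | case2 x hx =>
    intro s extra hex
    have hnot : ¬ ((extra ++ [1 + s]).contains s = true) := by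
      simp only [List.contains_iff_mem, List.mem_append, List.mem_singleton]
      rintro (h | h)
      · have := hex _ h; omega
      · omega
    simp only [PySem.List.enumerate_cons, PySem.List.enumerate_nil, List.map_cons,
      List.map_nil]
    rw [if_neg hnot]
    simp [pvFA]
  | case3 x hx =>
    intro s extra hex
    have hnot : ¬ ((extra ++ ([] : List Int)).contains s = true) := by
      simp only [List.contains_iff_mem, List.mem_append, List.mem_nil_iff, or_false]
      intro h
      have := hex _ h; omega
    simp only [PySem.List.enumerate_cons, PySem.List.enumerate_nil, List.map_cons,
      List.map_nil]
    rw [if_neg hnot]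
    simp [pvFA]
  | case4 x y rest hx ih =>
    intro s extra hex
    have hset : extra ++ ((1 : Int) :: (pvG rest).map (· + 2)).map (· + s)
        = (extra ++ [1 + s]) ++ (pvG rest).map (· + (s + 2)) := by
      simp only [List.map_cons, List.map_map, List.append_assoc]
      congr 2
      apply List.map_congr_left; intro a _; simp [Function.comp]; omega
    have hnotx : ¬ ((extra ++ [1 + s]) ++ (pvG rest).map (· + (s + 2))).contains s := by
      simp only [List.contains_iff_mem, List.mem_append, List.mem_map, List.mem_singleton]
      rintro ((h | h) | ⟨b, hb, hbe⟩)
      · have := hex _ h; omega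
      · omega
      · have := pvG_pos rest b hb; omega
    have hy : ((extra ++ [1 + s]) ++ (pvG rest).map (· + (s + 2))).contains (s + 1) := by
      simp only [List.contains_iff_mem, List.mem_append, List.mem_singleton]
      left; right; omega
    rw [hset]
    simp only [PySem.List.enumerate_cons, List.map_cons]
    rw [if_neg hnotx, if_pos hy]
    rw [show s + 1 + 1 = s + 2 by omega,
        ih (s + 2) (extra ++ [1 + s]) (by
          intro a ha
          rcases List.mem_append.mp ha with h | h
          · have := hex _ h; omega
          · simp at h; omega)]
    have hxeq : x = "--api-key" := beq_iff_eq.mp hx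
    simp [pvFA, hxeq]
  | case5 x y rest hx ih =>
    intro s extra hex
    have hset : extra ++ ((pvG (y :: rest)).map (· + 1)).map (· + s)
        = extra ++ (pvG (y :: rest)).map (· + (s + 1)) := by
      simp only [List.map_map]
      congr 1
      apply List.map_congr_left; intro a _; simp [Function.comp]; omega
    have hnotx : ¬ (extra ++ (pvG (y :: rest)).map (· + (s + 1))).contains s := by
      simp only [List.contains_iff_mem, List.mem_append, List.mem_map]
      rintro (h | ⟨b, hb, hbe⟩)
      · have := hex _ h; omega
      · have := pvG_pos (y :: rest) b hb; omega
    rw [hset]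
    have ih' := ih (s + 1) extra (by intro a ha; have := hex _ ha; omega)
    simp only [PySem.List.enumerate_cons, List.map_cons] at ih' ⊢
    rw [if_neg hnotx, ih']
    simp [pvFA, hx]

lemma pvB_eq_FA (cmd : List String) : redact_command_alt cmd = pvFA cmd := by
  unfold redact_command_alt
  have hc := pvCollect_eq cmd 0 [] le_rfl (by simp)
  simp only [Int.toNat_zero, List.drop_zero, List.nil_append] at hc
  rw [hc]
  have hm := pvMapRed cmd 0 [] (by simp)
  simpa using hm

-- ===== VERDICT (by name: the statement is the Claim_ definition above) =====
theorem redact_command_spec : Claim_equal_redact_command := by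
  intro command _
  unfold Spec_redact_command
  rw [pvA_eq_FA, pvB_eq_FA]
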